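-- pv_equiv track=rewrite | github.com/ahmedrazarais/LeetCode | sum-of-numbers-and-reverse.py | is_sum_of_integer_and_reverse
-- ===== SOURCE A (Python) =====
-- def is_sum_of_integer_and_reverse(num):
--     # Loop through all possible integers from 0 to num
--     for i in range(num + 1):
--         # Convert the current integer to a string
--         i_str = str(i)
--
--         # Reverse the string representation of the integer
--         reverse_str = i_str[::-1]
--
--         # Convert the reversed string back to an integer
--         reverse_int = int(reverse_str)
--
--         # Check if the sum of the integer and its reverse equals num
--         if i + reverse_int == num:
--             # If a valid pair is found, return True
--             return True
--
--     # If no valid pair is found after checking all possibilities, return False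
--     return False
-- ===== SOURCE B (Python) =====
-- def is_sum_of_integer_and_reverse(num):
--     # Divide-and-conquer: does any i in [lo, hi] satisfy i + reverse(i) == num?
--     # The interval is split at its midpoint and the two halves are tested
--     # recursively (a tree traversal instead of A's flat left-to-right loop).
--     def found(lo, hi):
--         if lo > hi:
--             return False
--         if lo == hi:
--             return lo + int(str(lo)[::-1]) == num
--         mid = (lo + hi) // 2
--         return found(lo, mid) or found(mid + 1, hi)
--     return found(0, num)
-- ===== Notes on version B (the rewrite author's own statement) =====
-- stated objective: alternative
-- what changed: replaces A's flat left-to-right scan of range(num+1) with a divide-and-conquer recursion that splits the interval [0,num] at its midpoint and tests the two halves recursively (tree-shaped traversal with short-circuit or, instead of a linear loop); the per-candidate test i+int(str(i)[::-1])==num is unchanged and equivalence rests on the order-independence of the existence test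
import Mathlib
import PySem

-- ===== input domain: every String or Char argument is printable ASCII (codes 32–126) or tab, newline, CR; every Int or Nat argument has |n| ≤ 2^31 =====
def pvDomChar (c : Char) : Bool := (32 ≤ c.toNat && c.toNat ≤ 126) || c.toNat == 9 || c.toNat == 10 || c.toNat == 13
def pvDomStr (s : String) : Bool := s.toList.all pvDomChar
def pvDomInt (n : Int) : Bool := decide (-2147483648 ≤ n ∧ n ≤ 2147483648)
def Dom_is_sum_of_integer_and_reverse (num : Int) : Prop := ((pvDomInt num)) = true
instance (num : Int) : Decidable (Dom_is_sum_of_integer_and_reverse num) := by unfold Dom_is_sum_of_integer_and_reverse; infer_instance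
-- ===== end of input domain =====

-- B replaces A's flat left-to-right scan of range(num+1) by a divide-and-conquer
-- recursion that splits [0, num] at the midpoint and tests the halves (same
-- per-candidate test and cost); equivalence is proved by showing both compute the
-- order-independent existence of a candidate in the interval.


-- ===== PORT A =====
-- i_str = str(i); reverse_str = i_str[::-1]; reverse_int = int(reverse_str)
-- slice? with step -1 is never none; int() never raises here (str(i) for the loop's
-- i ≥ 0 reverses to a pure digit string), so the getD defaults are unreachable.
def pyRevA (i : Int) : Int :=
  let iStr := PySem.Int.toStr i
  let revStr := (PySem.Str.slice? iStr none none (-1)).getD ""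
  (PySem.Int.ofStr? revStr).getD 0

-- for i in range(num + 1): if i + reverse_int == num: return True / return False
def goA (num : Int) : List Int → Bool
  | [] => false
  | i :: rest => if i + pyRevA i == num then true else goA num rest

def is_sum_of_integer_and_reverse (num : Int) : Bool :=
  goA num (PySem.List.pyRange 0 (num + 1) 1)

-- ===== PORT B =====
-- int(str(lo)[::-1]) — the same per-candidate expression as in Source A/Source B
def pyRevB (i : Int) : Int :=
  let iStr := PySem.Int.toStr i
  let revStr := (PySem.Str.slice? iStr none none (-1)).getD ""
  (PySem.Int.ofStr? revStr).getD 0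

-- def found(lo, hi): if lo > hi: False; if lo == hi: test(lo);
--   mid = (lo + hi) // 2; return found(lo, mid) or found(mid + 1, hi)
def foundB (num lo hi : Int) : Bool :=
  if _h1 : lo > hi then false
  else if _h2 : lo = hi then lo + pyRevB lo == num
  else
    let mid := PySem.Int.floordiv (lo + hi) 2
    foundB num lo mid || foundB num (mid + 1) hi
termination_by (hi - lo).toNat
decreasing_by
  · have hb := PySem.Int.floordiv_two_mid_bounds (lo := lo) (hi := hi) (by omega)
    have hlt : PySem.Int.floordiv (lo + hi) 2 < hi := by
      have := PySem.Int.floordiv_lt_iff_lt_mul (a := lo + hi) (b := 2) (q := hi) (by omega)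
      omega
    omega
  · have hb := PySem.Int.floordiv_two_mid_bounds (lo := lo) (hi := hi) (by omega)
    omega

def is_sum_of_integer_and_reverse_alt (num : Int) : Bool := foundB num 0 num

-- ===== PRECONDITION & SPEC =====
def Spec_is_sum_of_integer_and_reverse (num : Int) (out : Bool) : Prop := out = is_sum_of_integer_and_reverse_alt num
instance (num : Int) (out : Bool) : Decidable (Spec_is_sum_of_integer_and_reverse num out) := by unfold Spec_is_sum_of_integer_and_reverse; infer_instance

-- ===== CLAIM (what is proved, stated in full; the proofs are below) =====
def Claim_equal_is_sum_of_integer_and_reverse : Prop := ∀ (num : Int), Dom_is_sum_of_integer_and_reverse num → Spec_is_sum_of_integer_and_reverse num (is_sum_of_integer_and_reverse num)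

-- ===== LEMMAS AND PROOFS =====
-- A's early-return scan is the 'any' of its range.
theorem goA_eq_any (num : Int) (l : List Int) :
    goA num l = l.any (fun i => i + pyRevA i == num) := by
  induction l with
  | nil => rfl
  | cons i rest ih =>
    by_cases h : i + pyRevA i == num <;> simp [goA, h, ih]

-- B's divide-and-conquer is the 'any' of the interval: traversal shape does not matter.
theorem foundB_eq_any (num lo hi : Int) :
    foundB num lo hi = (PySem.List.pyRange lo (hi + 1) 1).any (fun i => i + pyRevB i == num) := by
  by_cases h1 : lo > hi
  · rw [foundB]
    simp [h1, PySem.List.pyRange_one_eq_nil (by omega : hi + 1 ≤ lo)]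
  · by_cases h2 : lo = hi
    · rw [foundB]
      subst h2
      simp [PySem.List.pyRange_one_singleton]
    · have hb := PySem.Int.floordiv_two_mid_bounds (lo := lo) (hi := hi) (by omega)
      have hlt : PySem.Int.floordiv (lo + hi) 2 < hi := by
        have := PySem.Int.floordiv_lt_iff_lt_mul (a := lo + hi) (b := 2) (q := hi) (by omega)
        omega
      have ih1 := foundB_eq_any num lo (PySem.Int.floordiv (lo + hi) 2)
      have ih2 := foundB_eq_any num (PySem.Int.floordiv (lo + hi) 2 + 1) hi
      rw [foundB]
      simp only [h1, h2, dite_false]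
      rw [PySem.List.pyRange_one_append lo (PySem.Int.floordiv (lo + hi) 2 + 1) (hi + 1)
        (by omega) (by omega)]
      rw [List.any_append, ih1, ih2]
termination_by (hi - lo).toNat
decreasing_by
  · omega
  · omega

-- the per-candidate tests of the two ports coincide (they are the same expression)
theorem pyRevB_eq_pyRevA : pyRevB = pyRevA := rfl

-- ===== VERDICT (by name: the statement is the Claim_ definition above) =====
theorem is_sum_of_integer_and_reverse_spec : Claim_equal_is_sum_of_integer_and_reverse := by
  intro num _
  unfold Spec_is_sum_of_integer_and_reverse is_sum_of_integer_and_reverse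
    is_sum_of_integer_and_reverse_alt
  rw [goA_eq_any, foundB_eq_any, pyRevB_eq_pyRevA]
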